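-- pv_equiv track=rewrite | github.com/azure-architect/pydantic_youtube | graph/transcript_analysis_nodes.py | _fallback_segmentation
-- ===== SOURCE A (Python) =====
-- from typing import Annotated, Union, List, Dict, Any, Optional, Set
--
-- def _fallback_segmentation(transcript: str) -> List[Dict[str, str]]:
--     """
--     Fallback segmentation method when function calling fails
--     Uses a simple paragraph-based approach
--     """
--     segments = []
--
--     # Split transcript by double newlines to identify paragraphs
--     paragraphs = transcript.split("\n\n")
--
--     # Group paragraphs into reasonable segments
--     current_segment = []
--     current_topic = "Introduction"
--     segment_count = 1
--
--     for i, paragraph in enumerate(paragraphs):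
--         paragraph = paragraph.strip()
--         if not paragraph:
--             continue
--
--         # Start a new segment every ~5 paragraphs or 500 words
--         # This is a simple heuristic that can be adjusted
--         if (len(current_segment) >= 5 or
--             sum(len(p.split()) for p in current_segment) > 500):
--             if current_segment:
--                 segments.append({
--                     "topic": current_topic,
--                     "content": "\n\n".join(current_segment)
--                 })
--                 current_segment = []
--                 segment_count += 1
--                 current_topic = f"Section {segment_count}"
--
--         current_segment.append(paragraph)
--
--     # Don't forget the last segment
--     if current_segment:
--         segments.append({
--             "topic": current_topic,
--             "content": "\n\n".join(current_segment)
--         })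
--
--     # If we couldn't create any segments, use the entire transcript
--     if not segments:
--         segments = [{"topic": "Full Transcript", "content": transcript}]
--
--     return segments
-- ===== SOURCE B (Python) =====
-- def _fallback_segmentation(transcript: str):
--     # Stage 1: clean paragraph list
--     paras = [q for q in (p.strip() for p in transcript.split("\n\n")) if q]
--     if not paras:
--         return [{"topic": "Full Transcript", "content": transcript}]
--     # Stage 2: prefix word counts, so group boundaries are pure arithmetic
--     W = [0]
--     t = 0
--     for p in paras:
--         t += len(p.split())
--         W.append(t)
--     # Stage 3: compute cut points with two pointers over the prefix sums:
--     # a group starting at s ends at the smallest e > s with e-s >= 5 or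
--     # more than 500 words in paras[s:e] (capped at n)
--     n = len(paras)
--     cuts = [0]
--     s = 0
--     while s < n:
--         e = s + 1
--         while e < n and e - s < 5 and W[e] - W[s] <= 500:
--             e += 1
--         cuts.append(e)
--         s = e
--     # Stage 4: materialise and label the slices
--     return [{"topic": "Introduction" if i == 0 else f"Section {i + 1}",
--              "content": "\n\n".join(paras[a:b])}
--             for i, (a, b) in enumerate(zip(cuts, cuts[1:]))]
-- ===== Notes on version B (the rewrite author's own statement) =====
-- stated objective: alternative
-- what changed: Replaces A's stateful accumulation loop (threading current_segment/current_topic/segment_count and flushing groups as it goes) by a staged arithmetic algorithm: build prefix word-count sums, compute group cut points with a two-pointer while loop over the prefix sums, then slice and label the paragraph list by those cut indices.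
import Mathlib
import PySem

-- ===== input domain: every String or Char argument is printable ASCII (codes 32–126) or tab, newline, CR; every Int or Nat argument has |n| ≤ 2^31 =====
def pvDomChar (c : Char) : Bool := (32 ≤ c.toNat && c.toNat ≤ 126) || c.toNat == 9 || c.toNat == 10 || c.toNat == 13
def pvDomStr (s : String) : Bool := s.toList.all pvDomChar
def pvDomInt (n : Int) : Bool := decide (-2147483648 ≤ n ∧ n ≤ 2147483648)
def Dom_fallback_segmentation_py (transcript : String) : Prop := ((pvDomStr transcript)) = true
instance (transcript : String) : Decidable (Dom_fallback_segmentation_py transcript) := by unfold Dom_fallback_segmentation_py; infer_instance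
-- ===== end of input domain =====

-- B replaces A's stateful accumulation loop by a staged algorithm: prefix word-count sums,
-- two-pointer cut-point computation over them, then slicing and labelling by index; objective: alternative.


-- transcript.split("\n\n"): exact via PySem.Chars.splitOn (separator nonempty)
def pvSplitPar (s : String) : List String :=
  (PySem.Chars.splitOn s.toList ['\n', '\n']).map String.ofList

-- len(p.split())
def pvWc (p : String) : Nat := (PySem.Str.split₀ p).length

-- ===== PORT A =====
-- sum(len(p.split()) for p in current_segment)
def pvWordSumA (cur : List String) : Nat :=
  cur.foldl (fun a p => a + pvWc p) 0

-- the body of A's for-loop; state = (segments, current_segment, current_topic, segment_count)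
def pvStepA (st : List (List (String × String)) × List String × String × Int) (par : String) :
    List (List (String × String)) × List String × String × Int :=
  let p := PySem.Str.strip par
  if p = "" then st
  else
    let (segments, cur, topic, cnt) := st
    let (segments, cur, topic, cnt) :=
      if 5 ≤ cur.length ∨ 500 < pvWordSumA cur then
        if cur ≠ [] then
          (segments ++ [[("topic", topic), ("content", PySem.Str.join "\n\n" cur)]],
           ([] : List String), "Section " ++ PySem.Int.toStr (cnt + 1), cnt + 1)
        else (segments, cur, topic, cnt)
      else (segments, cur, topic, cnt)
    (segments, cur ++ [p], topic, cnt)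

def fallback_segmentation_py (transcript : String) : List (List (String × String)) :=
  let paragraphs := pvSplitPar transcript
  let st := paragraphs.foldl pvStepA ([], [], "Introduction", 1)
  let segments := st.1
  let cur := st.2.1
  let topic := st.2.2.1
  let segments :=
    if cur ≠ [] then
      segments ++ [[("topic", topic), ("content", PySem.Str.join "\n\n" cur)]]
    else segments
  if segments = [] then [[("topic", "Full Transcript"), ("content", transcript)]]
  else segments

-- ===== PORT B =====
-- stage 1: cleaned paragraph list
def pvCleanB (transcript : String) : List String :=
  ((pvSplitPar transcript).map PySem.Str.strip).filter (· ≠ "")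

-- stage 2: prefix word-count sums W with running total t (Python ints; all values are
-- nonnegative and W is monotone, so Nat with truncated subtraction below is exact)
def pvPrefixB (paras : List String) : List Nat × Nat :=
  paras.foldl (fun Wt p => (Wt.1 ++ [Wt.2 + pvWc p], Wt.2 + pvWc p)) ([0], 0)

-- stage 3 inner while loop: advance e while e < n and e-s < 5 and W[e]-W[s] <= 500
-- (W[e], W[s] indexed in range by construction, so getD is exact)
def pvFindEndGo (W : List Nat) (n s e : Nat) : Nat :=
  if h : e < n ∧ e - s < 5 ∧ W.getD e 0 - W.getD s 0 ≤ 500 then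
    pvFindEndGo W n s (e + 1)
  else e
termination_by n - e
decreasing_by omega

-- termination fact for the outer while loop (cited in its decreasing_by)
theorem pvFindEndGo_ge (W : List Nat) (n s e : Nat) : e ≤ pvFindEndGo W n s e := by
  unfold pvFindEndGo
  split
  · exact le_trans (by omega) (pvFindEndGo_ge W n s (e + 1))
  · exact le_refl e
termination_by n - e
decreasing_by omega

-- stage 3 outer while loop: collect the cut points after 0
def pvCutsGo (W : List Nat) (n s : Nat) : List Nat :=
  if h : s < n then
    pvFindEndGo W n s (s + 1) :: pvCutsGo W n (pvFindEndGo W n s (s + 1))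
  else []
termination_by n - s
decreasing_by
  have := pvFindEndGo_ge W n s (s + 1)
  omega

def fallback_segmentation_py_alt (transcript : String) : List (List (String × String)) :=
  let paras := pvCleanB transcript
  if paras.isEmpty then [[("topic", "Full Transcript"), ("content", transcript)]]
  else
    let W := (pvPrefixB paras).1
    let n := paras.length
    let cuts := 0 :: pvCutsGo W n 0
    -- stage 4: zip(cuts, cuts[1:]) (cuts[1:] via PySem slice), slice and label
    ((cuts.zip (PySem.List.slice cuts (some 1) none)).zipIdx).map (fun x =>
      [("topic", if x.2 = 0 then "Introduction"
                 else "Section " ++ PySem.Int.toStr ((x.2 : Int) + 1)),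
       ("content", PySem.Str.join "\n\n"
          (PySem.List.slice paras (some (x.1.1 : Int)) (some (x.1.2 : Int))))])

-- ===== PRECONDITION & SPEC =====
def Spec_fallback_segmentation_py (transcript : String) (out : List (List (String × String))) : Prop := out = fallback_segmentation_py_alt transcript
instance (transcript : String) (out : List (List (String × String))) : Decidable (Spec_fallback_segmentation_py transcript out) := by unfold Spec_fallback_segmentation_py; infer_instance

-- ===== CLAIM (what is proved, stated in full; the proofs are below) =====
def Claim_equal_fallback_segmentation_py : Prop := ∀ (transcript : String), Dom_fallback_segmentation_py transcript → Spec_fallback_segmentation_py transcript (fallback_segmentation_py transcript)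

-- ===== LEMMAS AND PROOFS =====

-- label of group number i (both sides produce exactly this dict)
def pvLabelB (i : Nat) (g : List String) : List (String × String) :=
  [("topic", if i = 0 then "Introduction" else "Section " ++ PySem.Int.toStr ((i : Int) + 1)),
   ("content", PySem.Str.join "\n\n" g)]

-- cur and (len(cur) >= 5 or words > 500)
def pvFullB (cur : List String) : Bool :=
  !cur.isEmpty && (decide (5 ≤ cur.length) || decide (500 < pvWordSumA cur))

-- greedy partition step (intermediate spec both sides are reduced to)
def pvPartB (st : List (List String) × List String) (p : String) :
    List (List String) × List String :=
  let (groups, cur) := st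
  if pvFullB cur then (groups ++ [cur], [p]) else (groups, cur ++ [p])

-- grow a group until full or input exhausted
def pvGrow (cur : List String) (rest : List String) : List String × List String :=
  match rest with
  | [] => (cur, [])
  | p :: rs => if pvFullB cur then (cur, p :: rs) else pvGrow (cur ++ [p]) rs

-- consecutive slices of paras given the cut list
def pvSlices (paras : List String) (a : Nat) (cs : List Nat) : List (List String) :=
  match cs with
  | [] => []
  | c :: cs' => (paras.drop a).take (c - a) :: pvSlices paras c cs'

-- running scan of word counts
def pvScan (t : Nat) (ps : List String) : List Nat :=
  match ps with
  | [] => []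
  | p :: rs => (t + pvWc p) :: pvScan (t + pvWc p) rs

-- invariant tying A's loop state to the greedy partition state
def pvR (ast : List (List (String × String)) × List String × String × Int)
    (bst : List (List String) × List String) : Prop :=
  ast.1 = bst.1.zipIdx.map (fun gi => pvLabelB gi.2 gi.1) ∧
  ast.2.1 = bst.2 ∧
  ast.2.2.1 = (if bst.1.length = 0 then "Introduction"
               else "Section " ++ PySem.Int.toStr ((bst.1.length : Int) + 1)) ∧
  ast.2.2.2 = (bst.1.length : Int) + 1

theorem pvFullB_iff (cur : List String) :
    pvFullB cur = true ↔ (cur ≠ [] ∧ (5 ≤ cur.length ∨ 500 < pvWordSumA cur)) := by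
  simp [pvFullB]

theorem pvStepA_R (ast : List (List (String × String)) × List String × String × Int)
    (bst : List (List String) × List String) (par : String) (h : pvR ast bst) :
    pvR (pvStepA ast par)
      (if PySem.Str.strip par = "" then bst else pvPartB bst (PySem.Str.strip par)) := by
  obtain ⟨segments, cur, topic, cnt⟩ := ast
  obtain ⟨groups, bcur⟩ := bst
  obtain ⟨h1, h2, h3, h4⟩ := h
  simp only at h1 h2 h3 h4
  subst h1 h2 h3 h4
  by_cases hp : PySem.Str.strip par = ""
  · simp [pvStepA, hp, pvR]
  · simp only [if_neg hp]
    by_cases hfull : pvFullB cur = true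
    · obtain ⟨hbne, hcond⟩ := (pvFullB_iff cur).mp hfull
      simp only [pvStepA, if_neg hp, if_pos hcond, if_pos hbne,
        pvPartB, if_pos hfull, pvR]
      refine ⟨?_, ?_, ?_, ?_⟩
      · rcases groups with _ | ⟨g, gs⟩ <;>
          simp [List.zipIdx_append, pvLabelB] <;> congr 1 <;> ring
      · simp
      · simp
      · simp only [List.length_append, List.length_cons, List.length_nil]; push_cast; ring
    · have hcond : ¬ (5 ≤ cur.length ∨ 500 < pvWordSumA cur) := by
        by_cases hb : cur = []
        · subst hb; decide
        · intro hc; exact hfull ((pvFullB_iff cur).mpr ⟨hb, hc⟩)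
      simp [pvStepA, hp, hcond, pvPartB, hfull, pvR]

theorem pvFold_R (ps : List String)
    (ast : List (List (String × String)) × List String × String × Int)
    (bst : List (List String) × List String) (h : pvR ast bst) :
    pvR (ps.foldl pvStepA ast)
      (((ps.map PySem.Str.strip).filter (· ≠ "")).foldl pvPartB bst) := by
  induction ps generalizing ast bst with
  | nil => simpa using h
  | cons par rest ih =>
    have := pvStepA_R ast bst par h
    by_cases hp : PySem.Str.strip par = ""
    · simp only [hp] at this
      simpa [List.foldl_cons, hp] using ih _ _ (by simpa [pvStepA, hp] using h)
    · simp only [if_neg hp] at this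
      simpa [List.foldl_cons, hp] using ih _ _ this

-- A's final assembly, rewritten through pvR to the greedy groups with labels
theorem pvAssemble (ast : List (List (String × String)) × List String × String × Int)
    (bst : List (List String) × List String) (t : String) (h : pvR ast bst) :
    (if (if ast.2.1 ≠ [] then
           ast.1 ++ [[("topic", ast.2.2.1), ("content", PySem.Str.join "\n\n" ast.2.1)]]
         else ast.1) = []
     then [[("topic", "Full Transcript"), ("content", t)]]
     else (if ast.2.1 ≠ [] then
             ast.1 ++ [[("topic", ast.2.2.1), ("content", PySem.Str.join "\n\n" ast.2.1)]]
           else ast.1))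
    = (if (if bst.2.isEmpty then bst.1 else bst.1 ++ [bst.2]).isEmpty
       then [[("topic", "Full Transcript"), ("content", t)]]
       else ((if bst.2.isEmpty then bst.1 else bst.1 ++ [bst.2]).zipIdx.map
               (fun gi => pvLabelB gi.2 gi.1))) := by
  obtain ⟨segs, cur, topic, cnt⟩ := ast
  obtain ⟨groups, bcur⟩ := bst
  obtain ⟨h1, h2, h3, h4⟩ := h
  simp only at h1 h2 h3 h4
  subst h1 h2 h3
  by_cases hb : cur = []
  · subst hb
    rcases groups with _ | ⟨g, gs⟩ <;> simp [pvLabelB]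
  · have hb' : cur.isEmpty = false := List.isEmpty_eq_false_iff.mpr hb
    rcases groups with _ | ⟨g, gs⟩ <;>
      simp [List.zipIdx_append, pvLabelB, hb, hb'] <;> congr 1 <;> ring

-- ---- word-count / prefix-sum facts ----

theorem pvWsum_foldl (t : Nat) (xs : List String) :
    xs.foldl (fun a p => a + pvWc p) t = t + pvWordSumA xs := by
  induction xs generalizing t with
  | nil => simp [pvWordSumA]
  | cons x xs ih =>
    rw [List.foldl_cons, ih]
    have h2 : pvWordSumA (x :: xs) = 0 + pvWc x + pvWordSumA xs := by
      unfold pvWordSumA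
      rw [List.foldl_cons, ih]
      rfl
    omega

theorem pvWsum_cons (x : String) (xs : List String) :
    pvWordSumA (x :: xs) = pvWc x + pvWordSumA xs := by
  show (x :: xs).foldl (fun a p => a + pvWc p) 0 = _
  rw [List.foldl_cons, pvWsum_foldl]
  omega

theorem pvWsum_append (xs ys : List String) :
    pvWordSumA (xs ++ ys) = pvWordSumA xs + pvWordSumA ys := by
  show (xs ++ ys).foldl (fun a p => a + pvWc p) 0 = _
  rw [List.foldl_append, pvWsum_foldl]
  rfl

theorem pvPrefix_go (ps : List String) (acc : List Nat) (t : Nat) :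
    ps.foldl (fun Wt p => (Wt.1 ++ [Wt.2 + pvWc p], Wt.2 + pvWc p)) (acc, t)
      = (acc ++ pvScan t ps, t + pvWordSumA ps) := by
  induction ps generalizing acc t with
  | nil => simp [pvScan, pvWordSumA]
  | cons p rs ih =>
    simp only [List.foldl_cons, ih, pvScan, pvWsum_cons, List.append_assoc,
      List.singleton_append]
    exact Prod.ext rfl (by omega)

theorem pvScan_getD (ps : List String) (t i : Nat) (hi : i < ps.length) :
    (pvScan t ps).getD i 0 = t + pvWordSumA (ps.take (i + 1)) := by
  induction ps generalizing t i with
  | nil => simp at hi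
  | cons p rs ih =>
    cases i with
    | zero => simp [pvScan, pvWsum_cons, pvWordSumA]
    | succ j =>
      have hj : j < rs.length := by simpa using hi
      simp only [pvScan, List.getD_cons_succ, ih _ _ hj, List.take_succ_cons, pvWsum_cons]
      omega

theorem pvW_getD (paras : List String) (i : Nat) (hi : i <= paras.length) :
    ((pvPrefixB paras).1).getD i 0 = pvWordSumA (paras.take i) := by
  unfold pvPrefixB
  rw [pvPrefix_go]
  cases i with
  | zero => simp [pvWordSumA]
  | succ j =>
    have hj : j < paras.length := by omega
    simp only [List.singleton_append, List.getD_cons_succ]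
    rw [pvScan_getD _ _ _ hj]
    omega

-- ---- slice facts ----

theorem pvSl_wsum (paras : List String) (s e : Nat) (hse : s <= e) (he : e <= paras.length) :
    pvWordSumA (paras.take e) =
      pvWordSumA (paras.take s) + pvWordSumA ((paras.drop s).take (e - s)) := by
  have h : paras.take e = paras.take s ++ (paras.drop s).take (e - s) := by
    rw [<- List.take_add]
    congr 1
    omega
  rw [h, pvWsum_append]

theorem pvSl_ne_nil (paras : List String) (s e : Nat) (hs : s < e) (hse : s < paras.length) :
    (paras.drop s).take (e - s) ≠ [] := by
  simp only [ne_eq, List.take_eq_nil_iff, List.drop_eq_nil_iff]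
  omega

-- pvFullB on a slice, decided by arithmetic on the prefix sums
theorem pvFull_slice (paras : List String) (s e : Nat) (hs : s < e) (he : e <= paras.length) :
    pvFullB ((paras.drop s).take (e - s)) =
      decide (5 <= e - s ∨ 500 <
        ((pvPrefixB paras).1).getD e 0 - ((pvPrefixB paras).1).getD s 0) := by
  have hlen : ((paras.drop s).take (e - s)).length = e - s := by
    simp only [List.length_take, List.length_drop]
    omega
  have hadd := pvSl_wsum paras s e (by omega) he
  have hW_e := pvW_getD paras e he
  have hW_s := pvW_getD paras s (by omega)
  have hne := pvSl_ne_nil paras s e hs (by omega)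
  rw [hW_e, hW_s, hadd]
  by_cases hc : 5 <= e - s ∨ 500 < pvWordSumA ((paras.drop s).take (e - s))
  · rw [(pvFullB_iff _).mpr ⟨hne, by omega⟩, eq_comm, decide_eq_true_iff]
    omega
  · have hf0 : pvFullB ((paras.drop s).take (e - s)) = false := by
      rw [Bool.eq_false_iff]
      intro hf
      obtain ⟨-, hor⟩ := (pvFullB_iff _).mp hf
      omega
    rw [hf0, eq_comm, decide_eq_false_iff_not]
    omega

theorem pvFindEndGo_le (W : List Nat) (n s e : Nat) (he : e <= n) :
    pvFindEndGo W n s e <= n := by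
  unfold pvFindEndGo
  split
  · next h => exact pvFindEndGo_le W n s (e + 1) (by omega)
  · exact he
termination_by n - e
decreasing_by omega

-- grow over the tail of paras reaches exactly the inner while loop's stop index
theorem pvGrowFind (paras : List String) (s e : Nat) (hs : s < e) (he : e <= paras.length) :
    pvGrow ((paras.drop s).take (e - s)) (paras.drop e)
      = ((paras.drop s).take (pvFindEndGo (pvPrefixB paras).1 paras.length s e - s),
         paras.drop (pvFindEndGo (pvPrefixB paras).1 paras.length s e)) := by
  rw [pvFindEndGo]
  split
  · next h =>
    have hen : e < paras.length := h.1
    have hfull : pvFullB ((paras.drop s).take (e - s)) = false := by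
      rw [pvFull_slice paras s e hs he, decide_eq_false_iff_not]
      omega
    rw [List.drop_eq_getElem_cons hen]
    have hstep : ((paras.drop s).take (e - s)) ++ [paras[e]]
        = (paras.drop s).take (e + 1 - s) := by
      have hlt' : e - s < (paras.drop s).length := by
        simp only [List.length_drop]
        omega
      have hget : paras[e] = (paras.drop s)[e - s]'hlt' := by
        simp only [List.getElem_drop]
        congr 1
        omega
      rw [hget, List.take_append_getElem]
      congr 1
      omega
    simp only [pvGrow, hfull, Bool.false_eq_true, if_false, hstep]
    exact pvGrowFind paras s (e + 1) (by omega) (by omega)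
  · next h =>
    by_cases hen : e = paras.length
    · subst hen
      simp [pvGrow]
    · have hlt : e < paras.length := by omega
      have hfull : pvFullB ((paras.drop s).take (e - s)) = true := by
        rw [pvFull_slice paras s e hs he, decide_eq_true_iff]
        omega
      rw [List.drop_eq_getElem_cons hlt]
      simp only [pvGrow, hfull, if_true]
termination_by paras.length - e
decreasing_by omega

-- the greedy fold expressed through one grown group
theorem pvFold_grow (ps : List String) (G : List (List String)) (cur : List String) :
    ps.foldl pvPartB (G, cur)
      = (match pvGrow cur ps with
         | (g, []) => (G, g)
         | (g, p :: rs) => rs.foldl pvPartB (G ++ [g], [p])) := by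
  induction ps generalizing cur with
  | nil => simp [pvGrow]
  | cons p rs ih =>
    by_cases hfull : pvFullB cur = true
    · simp [List.foldl_cons, pvPartB, hfull, pvGrow]
    · have hfull' : pvFullB cur = false := by
        rw [Bool.eq_false_iff]; exact hfull
      simp only [List.foldl_cons, pvPartB, hfull', Bool.false_eq_true, if_false, pvGrow]
      exact ih (cur ++ [p])

theorem pvFold_grow_nil (ps : List String) (G : List (List String)) (cur g : List String)
    (h : pvGrow cur ps = (g, [])) : ps.foldl pvPartB (G, cur) = (G, g) := by
  rw [pvFold_grow, h]

theorem pvFold_grow_cons (ps : List String) (G : List (List String)) (cur g : List String)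
    (p : String) (rs : List String) (h : pvGrow cur ps = (g, p :: rs)) :
    ps.foldl pvPartB (G, cur) = rs.foldl pvPartB (G ++ [g], [p]) := by
  rw [pvFold_grow, h]

def pvAsm (st : List (List String) × List String) : List (List String) :=
  if st.2.isEmpty then st.1 else st.1 ++ [st.2]

theorem pvFullB_nil : pvFullB [] = false := by decide

-- master lemma: the greedy fold over the tail of paras yields the cut-point slices
theorem pvFoldCuts (paras : List String) (G : List (List String)) (s : Nat)
    (hs : s < paras.length) :
    pvAsm ((paras.drop s).foldl pvPartB (G, []))
      = G ++ pvSlices paras s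
          (pvCutsGo (pvPrefixB paras).1 paras.length s) := by
  have hgrow : pvGrow ([] : List String) (paras.drop s)
      = ((paras.drop s).take (pvFindEndGo (pvPrefixB paras).1 paras.length s (s + 1) - s),
         paras.drop (pvFindEndGo (pvPrefixB paras).1 paras.length s (s + 1))) := by
    have hd : paras.drop s = paras[s] :: paras.drop (s + 1) := List.drop_eq_getElem_cons hs
    conv_lhs => rw [hd]
    simp only [pvGrow, pvFullB_nil, Bool.false_eq_true, if_false, List.nil_append]
    have h1 : [paras[s]] = (paras.drop s).take (s + 1 - s) := by
      rw [show s + 1 - s = 1 from by omega, hd, List.take_succ_cons, List.take_zero]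
    rw [h1, pvGrowFind paras s (s + 1) (by omega) (by omega)]
  have he_le : pvFindEndGo (pvPrefixB paras).1 paras.length s (s + 1) <= paras.length :=
    pvFindEndGo_le _ _ _ _ (by omega)
  have he_gt : s < pvFindEndGo (pvPrefixB paras).1 paras.length s (s + 1) :=
    lt_of_lt_of_le (by omega) (pvFindEndGo_ge _ _ _ _)
  set e := pvFindEndGo (pvPrefixB paras).1 paras.length s (s + 1) with he_def
  rw [pvCutsGo, dif_pos hs, <- he_def]
  by_cases hen : e = paras.length
  · have hd0 : paras.drop e = [] := by rw [hen]; simp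
    rw [pvFold_grow_nil _ G _ _ (by rw [hgrow, hd0])]
    have hne := pvSl_ne_nil paras s e he_gt hs
    have hne' : ((paras.drop s).take (e - s)).isEmpty = false :=
      List.isEmpty_eq_false_iff.mpr hne
    simp only [pvAsm, hne', Bool.false_eq_true, if_false]
    rw [pvCutsGo, dif_neg (by omega)]
    simp [pvSlices]
  · have hlt : e < paras.length := by omega
    have hd : paras.drop e = paras[e] :: paras.drop (e + 1) := List.drop_eq_getElem_cons hlt
    rw [pvFold_grow_cons _ G _ _ _ _ (by rw [hgrow, hd])]
    have hback : (paras.drop (e + 1)).foldl pvPartB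
          (G ++ [(paras.drop s).take (e - s)], [paras[e]])
        = (paras.drop e).foldl pvPartB (G ++ [(paras.drop s).take (e - s)], []) := by
      rw [hd, List.foldl_cons]
      simp [pvPartB, pvFullB_nil]
    rw [hback]
    rw [pvFoldCuts paras (G ++ [(paras.drop s).take (e - s)]) e hlt]
    simp [pvSlices, List.append_assoc]
termination_by paras.length - s
decreasing_by
  have := pvFindEndGo_ge (pvPrefixB paras).1 paras.length s (s + 1)
  omega

-- the slice list as a map over consecutive cut pairs
theorem pvSlices_zip (paras : List String) (cs : List Nat) (a : Nat) :
    pvSlices paras a cs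
      = ((a :: cs).zip cs).map (fun ab => (paras.drop ab.1).take (ab.2 - ab.1)) := by
  induction cs generalizing a with
  | nil => simp [pvSlices]
  | cons c cs' ih => simp [pvSlices, List.zip_cons_cons, ih]

-- ===== VERDICT (by name: the statement is the Claim_ definition above) =====
theorem fallback_segmentation_py_spec : Claim_equal_fallback_segmentation_py := by
  intro transcript _
  unfold Spec_fallback_segmentation_py
  have hR := pvFold_R (pvSplitPar transcript) ([], [], "Introduction", 1) ([], [])
    (by simp [pvR])
  have hA := pvAssemble _ _ transcript hR
  simp only [fallback_segmentation_py, fallback_segmentation_py_alt]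
  rw [hA]
  have hfold : ((pvSplitPar transcript).map PySem.Str.strip).filter (· ≠ "")
      = pvCleanB transcript := rfl
  rw [hfold]
  by_cases hnil : pvCleanB transcript = []
  · rw [hnil]
    simp
  · have hn : 0 < (pvCleanB transcript).length := List.length_pos_of_ne_nil hnil
    have hM := pvFoldCuts (pvCleanB transcript) [] 0 hn
    rw [List.drop_zero, List.nil_append] at hM
    unfold pvAsm at hM
    have hne : (pvCleanB transcript).isEmpty = false := List.isEmpty_eq_false_iff.mpr hnil
    rw [hne]
    simp only [Bool.false_eq_true, if_false]
    rw [hM]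
    have hcuts : pvCutsGo (pvPrefixB (pvCleanB transcript)).1 (pvCleanB transcript).length 0
        ≠ [] := by
      rw [pvCutsGo, dif_pos hn]
      simp
    obtain ⟨c, cs, hcs⟩ := List.exists_cons_of_ne_nil hcuts
    have hSne : pvSlices (pvCleanB transcript) 0
        (pvCutsGo (pvPrefixB (pvCleanB transcript)).1 (pvCleanB transcript).length 0) ≠ [] := by
      rw [hcs]
      simp [pvSlices]
    have hSne' : (pvSlices (pvCleanB transcript) 0
        (pvCutsGo (pvPrefixB (pvCleanB transcript)).1 (pvCleanB transcript).length 0)).isEmpty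
        = false := List.isEmpty_eq_false_iff.mpr hSne
    rw [hSne']
    simp only [Bool.false_eq_true, if_false]
    rw [pvSlices_zip, PySem.List.slice_from_one, List.tail_cons, List.zipIdx_map,
      List.map_map]
    apply List.map_congr_left
    intro x hx
    simp only [Function.comp, Prod.map, id, pvLabelB, PySem.List.slice_natCast]
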